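-- pv_equiv track=rewrite | github.com/invimirage/FinalEvent | TextAnalysis/text_scorer.py | gen_correct_data
-- ===== SOURCE A (Python) =====
-- def gen_correct_data(text_data, embeds):
--     separated_points = [0]
--     total_len = 0
--     for slices in text_data:
--         total_len += len(slices)
--         separated_points.append(total_len)
--     embeds_flat = sum(embeds, [])
--     embeds_per_text = []
--     for i in range(len(separated_points) - 1):
--         embeds_per_text.append(
--             embeds_flat[separated_points[i] : separated_points[i + 1]]
--         )
--     return embeds_per_text
-- ===== SOURCE B (Python) =====
-- def gen_correct_data(text_data, embeds):
--     it = iter([x for row in embeds for x in row])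
--     result = []
--     for chunk in text_data:
--         result.append([x for _, x in zip(chunk, it)])
--     return result
-- ===== Notes on version B (the rewrite author's own statement) =====
-- stated objective: faster
-- what changed: Replaced A's quadratic sum(embeds, []) flatten and prefix-sum offsets array with a linear list-comprehension flatten consumed by an iterator in a single streaming pass, one chunk-sized piece per text_data entry.
import Mathlib
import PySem

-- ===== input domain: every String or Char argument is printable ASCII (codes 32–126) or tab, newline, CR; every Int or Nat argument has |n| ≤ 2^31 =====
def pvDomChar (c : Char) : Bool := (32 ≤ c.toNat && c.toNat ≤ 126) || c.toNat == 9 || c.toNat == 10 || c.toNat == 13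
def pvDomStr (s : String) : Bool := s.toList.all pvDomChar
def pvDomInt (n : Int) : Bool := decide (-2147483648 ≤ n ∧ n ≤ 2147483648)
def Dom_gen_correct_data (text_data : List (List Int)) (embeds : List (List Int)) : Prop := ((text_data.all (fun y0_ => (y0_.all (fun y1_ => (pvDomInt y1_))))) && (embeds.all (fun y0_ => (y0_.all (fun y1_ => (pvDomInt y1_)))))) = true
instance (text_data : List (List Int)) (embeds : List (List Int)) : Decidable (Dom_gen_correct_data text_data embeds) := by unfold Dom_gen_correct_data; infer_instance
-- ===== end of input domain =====

-- B replaces A's quadratic sum(embeds, []) flatten + prefix-sum offsets + index slicing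
-- by a linear comprehension flatten consumed in one streaming pass, chunk by chunk (faster).

-- ===== PORT A =====
def gen_correct_data (text_data : List (List Int)) (embeds : List (List Int)) : List (List Int) :=
  -- separated_points/total_len loop
  let st := text_data.foldl
    (fun (st : List Int × Int) slices =>
      let total_len := st.2 + PySem.List.len slices
      (st.1 ++ [total_len], total_len)) ([0], 0)
  let separated_points := st.1
  -- embeds_flat = sum(embeds, [])
  let embeds_flat := embeds.foldl (fun acc e => acc ++ e) ([] : List Int)
  -- for i in range(len(separated_points) - 1): append slice
  (PySem.List.pyRange 0 (PySem.List.len separated_points - 1) 1).foldl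
    (fun acc i =>
      acc ++ [PySem.List.slice embeds_flat
        (some (PySem.List.pyGetD separated_points i 0))
        (some (PySem.List.pyGetD separated_points (i + 1) 0))]) []

-- ===== PORT B =====
-- the streaming loop: one chunk-sized piece of the flat embeds per text_data entry
def pvAltChunks : List (List Int) → List Int → List (List Int)
  | [], _ => []
  | chunk :: rest, flat =>
      flat.take chunk.length :: pvAltChunks rest (flat.drop chunk.length)

def gen_correct_data_alt (text_data : List (List Int)) (embeds : List (List Int)) : List (List Int) :=
  pvAltChunks text_data (embeds.flatMap (fun row => row))

-- ===== PRECONDITION & SPEC =====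
def Spec_gen_correct_data (text_data : List (List Int)) (embeds : List (List Int)) (out : List (List Int)) : Prop := out = gen_correct_data_alt text_data embeds
instance (text_data : List (List Int)) (embeds : List (List Int)) (out : List (List Int)) : Decidable (Spec_gen_correct_data text_data embeds out) := by unfold Spec_gen_correct_data; infer_instance

-- ===== CLAIM (what is proved, stated in full; the proofs are below) =====
def Claim_equal_gen_correct_data : Prop := ∀ (text_data : List (List Int)) (embeds : List (List Int)), Dom_gen_correct_data text_data embeds → Spec_gen_correct_data text_data embeds (gen_correct_data text_data embeds)

-- ===== LEMMAS AND PROOFS =====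

-- Nat-valued prefix sums of the chunk lengths, starting after s elements
def pvNpts : List (List Int) → Nat → List Nat
  | [], _ => []
  | c :: r, s => (s + c.length) :: pvNpts r (s + c.length)

def pvSumLen (td : List (List Int)) : Nat := (td.map List.length).sum

lemma pvNpts_length : ∀ (td : List (List Int)) (s : Nat), (pvNpts td s).length = td.length := by
  intro td; induction td with
  | nil => intro s; rfl
  | cons c r ih => intro s; simp [pvNpts, ih]

lemma pvNpts_add : ∀ (td : List (List Int)) (s t : Nat),
    pvNpts td (s + t) = (pvNpts td t).map (s + ·) := by
  intro td; induction td with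
  | nil => intro s t; rfl
  | cons c r ih =>
    intro s t
    simp only [pvNpts, List.map_cons, List.cons.injEq]
    constructor
    · omega
    · have : s + t + c.length = s + (t + c.length) := by omega
      rw [this, ih]

-- characterisation of A's first loop (stated on the beta/zeta-reduced loop body)
lemma pvFoldA : ∀ (td : List (List Int)) (l : List Int) (s : Nat),
    td.foldl (fun (st : List Int × Int) slices =>
      (st.1 ++ [st.2 + (slices.length : Int)], st.2 + (slices.length : Int))) (l, (s : Int))
    = (l ++ (pvNpts td s).map (fun n : Nat => (n : Int)), ((s + pvSumLen td : Nat) : Int)) := by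
  intro td; induction td with
  | nil => intro l s; simp [pvNpts, pvSumLen]
  | cons c r ih =>
    intro l s
    simp only [List.foldl_cons]
    have h : (s : Int) + (c.length : Int) = ((s + c.length : Nat) : Int) := by push_cast; ring
    simp only [h]
    rw [ih]
    simp only [pvNpts, pvSumLen, List.map_cons, List.sum_cons, List.append_assoc,
      List.singleton_append, Prod.mk.injEq]
    refine ⟨trivial, ?_⟩
    congr 1; omega

lemma pvFoldA0 (td : List (List Int)) :
    td.foldl (fun (st : List Int × Int) slices =>
      (st.1 ++ [st.2 + (slices.length : Int)], st.2 + (slices.length : Int))) ([0], (0 : Int))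
    = ((0 : Int) :: (pvNpts td 0).map (fun n : Nat => (n : Int)), ((pvSumLen td : Nat) : Int)) := by
  have := pvFoldA td [0] 0
  simpa using this

lemma pvGetDCast : ∀ (l : List Nat) (j : Nat),
    ((l.map (fun n : Nat => (n : Int))).getD j 0) = ((l.getD j 0 : Nat) : Int) := by
  intro l; induction l with
  | nil => intro j; simp
  | cons a t ih =>
    intro j
    cases j with
    | zero => simp
    | succ m => simpa using ih m

-- the main induction: A's per-index slices equal B's streaming chunks
lemma pvMain : ∀ (td : List (List Int)) (flat : List Int),
    (List.range td.length).map (fun k =>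
      (flat.drop ((0 :: pvNpts td 0).getD k 0)).take
        ((0 :: pvNpts td 0).getD (k + 1) 0 - (0 :: pvNpts td 0).getD k 0))
    = pvAltChunks td flat := by
  intro td; induction td with
  | nil => intro flat; rfl
  | cons c r ih =>
    intro flat
    have hr : List.range (c :: r).length = 0 :: (List.range r.length).map Nat.succ := by
      simp [List.length_cons, List.range_succ_eq_map]
    rw [hr]
    simp only [List.map_cons, List.map_map, pvAltChunks, List.cons.injEq]
    have hshift : pvNpts r c.length = (pvNpts r 0).map (c.length + ·) := by
      have := pvNpts_add r c.length 0; simpa using this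
    refine ⟨?_, ?_⟩
    · simp [pvNpts]
    · rw [← ih (flat.drop c.length)]
      apply List.map_congr_left
      intro k hk
      simp only [List.mem_range] at hk
      simp only [Function.comp_apply]
      have hlen : (pvNpts r 0).length = r.length := pvNpts_length r 0
      have hget : ∀ j, j < r.length + 1 →
          (0 :: pvNpts (c :: r) 0).getD (j + 1) 0 = c.length + (0 :: pvNpts r 0).getD j 0 := by
        intro j hj
        simp only [pvNpts, Nat.zero_add, hshift, List.getD_cons_succ]
        cases j with
        | zero => simp
        | succ m =>
          have hm : m < (pvNpts r 0).length := by omega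
          simp only [List.getD_cons_succ]
          rw [List.getD_eq_getElem _ _ (by simpa using hm),
              List.getD_eq_getElem _ _ hm, List.getElem_map]
      rw [hget k (by omega), hget (k + 1) (by omega)]
      rw [List.drop_drop]
      congr 1; omega

-- A's range/slice loop over the prefix points, reduced to B's streaming recursion
lemma pvAeq (td : List (List Int)) (flat : List Int) :
    (PySem.List.pyRange 0
        (((((0 : Int) :: (pvNpts td 0).map (fun n : Nat => (n : Int)))).length : Int) - 1) 1).foldl
      (fun acc i =>
        acc ++ [PySem.List.slice flat
          (some (PySem.List.pyGetD ((0 : Int) :: (pvNpts td 0).map (fun n : Nat => (n : Int))) i 0))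
          (some (PySem.List.pyGetD ((0 : Int) :: (pvNpts td 0).map (fun n : Nat => (n : Int))) (i + 1) 0))]) []
    = pvAltChunks td flat := by
  have hlen : ((((0 : Int) :: (pvNpts td 0).map (fun n : Nat => (n : Int)))).length : Int) - 1
      = (td.length : Int) := by
    simp only [List.length_cons, List.length_map, pvNpts_length]
    push_cast; ring
  rw [hlen, PySem.List.foldl_append_singleton_eq_map, PySem.List.pyRange_one]
  simp only [Int.sub_zero, Int.toNat_natCast, List.map_map, List.nil_append]
  rw [← pvMain td flat]
  apply List.map_congr_left
  intro k hk
  simp only [List.mem_range] at hk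
  simp only [Function.comp_apply]
  have hcast : ((0 : Int) :: (pvNpts td 0).map (fun n : Nat => (n : Int)))
      = ((0 :: pvNpts td 0 : List Nat)).map (fun n : Nat => (n : Int)) := by
    simp only [List.map_cons, Nat.cast_zero]
  rw [hcast, show ((0 : Int) + (k : Int)) = ((k : Nat) : Int) by ring]
  rw [show (((k : Nat) : Int) + 1) = ((k + 1 : Nat) : Int) by push_cast; ring]
  rw [PySem.List.pyGetD_natCast, PySem.List.pyGetD_natCast, pvGetDCast, pvGetDCast,
    PySem.List.slice_natCast]

theorem gen_correct_data_spec : Claim_equal_gen_correct_data := by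
  intro text_data embeds _
  unfold Spec_gen_correct_data gen_correct_data gen_correct_data_alt
  simp only [PySem.List.len_eq]
  rw [pvFoldA0]
  rw [PySem.List.foldl_append_eq_flatMap (fun row : List Int => row) embeds ([] : List Int),
    List.nil_append]
  exact pvAeq text_data (embeds.flatMap (fun row => row))
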